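/- GENERATED by mk_final_copies.py from the proof of the farm's unit `start_decoder.C3b` (farm:start_decoder.C3b.1: Proof.lean) as the
   re-elaboration sweep compiled it — do not edit. -/
/-
  THE UNIT `start_decoder.C3b`: ONE ROUND of loop 3776 (`while (current_entry < c->entries)`, 0x114536 … 0x114533 with the two error stubs
  0x114507, 0x114579). The six stretches of Lemmas.lean, each from `C3.Inv` at a label to `C3.Inv` at the next, are chained with
  `ReachVia.trans`:

      c3b_head   loop8  → ret137             the check of `c->entries`
      c3b_test   ret137 → at_114590 (exit) ∨ ret138   `entries ≤ current_entry` ∨ `ilog(entries − current_entry)`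
      c3b_getn   ret138 → ret139             `n = get_bits(f, ilog)`, `n < 2^25`
      c3b_len    ret139 → ERR ∨ ret140       `current_length ≥ 32` → error ; the second check of `c->entries`
      c3b_fill   ret140 → ERR ∨ ret136       `current_entry + n > entries` → error ; memset
      c3b_back   ret136 → loop8              `++current_length`, `current_entry += n`
-/
import Asan.CheckWalk
import Vorbis.Spec.StartDecoderATest
import Vorbis.Spec.Units.start_decoder_C3b
import Vorbis.Spec.Worked.start_decoder_C3b_Lemmas

open X86 X86.User Asan Vorbis Vorbis.Spec Vorbis.Spec.StartDecoder

namespace Vorbis.Spec.start_decoder_C3b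

/-- `mov r13d, eax` with `eax = n < 2^25`: the whole register is `n`. -/
theorem c3b_r13_eq (rax : Word) (h : rax.toNat < 2 ^ 25) :
    Word.ofBV (Word.part Width.w32 rax) = UInt64.ofNat rax.toNat := by
  apply UInt64.toNat_inj.mp
  have e : (UInt64.ofNat rax.toNat).toNat = rax.toNat := toNat_addr _ (by omega)
  rw [Vorbis.toNat_ofBV32, Asan.part32_toNat, e]
  omega

/-- `lea r15d, [rbp + rax]` with `rbp = current_entry < 2^24`, `rax = n < 2^25`: no 32-bit wrap, the whole register is the sum. -/
theorem c3b_r15_eq (rbp rax : Word) (h1 : rbp.toNat < 2 ^ 24) (h2 : rax.toNat < 2 ^ 25) :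
    Word.ofBV (BitVec.setWidth 32 (rbp + rax).toBitVec) = UInt64.ofNat (rbp.toNat + rax.toNat) := by
  apply UInt64.toNat_inj.mp
  have e : (UInt64.ofNat (rbp.toNat + rax.toNat)).toNat = rbp.toNat + rax.toNat := toNat_addr _ (by omega)
  rw [Vorbis.toNat_ofBV32, e]
  simp only [BitVec.toNat_setWidth, UInt64.toNat_toBitVec, UInt64.toNat_add]
  omega

/-- Segment C3b: one round of loop 3776, from the assertion at the loop head `AtC3L` back to it with a smaller measure, or to the
loop's exit `AtC3X`, or to the error exit `AtERR`. -/
theorem segC3b_walk {Lay : Layout} (hLay : Lay.hi = 0x1000000) {μ : Microarch} (hμ : UserX.MicroOK μ) {u₀ : State}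
    (hcode : HasCodeNat Lay u₀ Vorbis.L.start_decoder.entry Vorbis.Code.code_start_decoder.nat Vorbis.L.start_decoder.size)
    (h_get_bits : ∀ (others : List Obj) (frames : List (Nat × FrameLayout)) (Blk : Block → Prop) (len : Nat),
      Calls Lay μ Vorbis.WayInv (Vorbis.conv u₀) Vorbis.L.get_bits.entry (Vorbis.Spec.get_bits.spec others frames Blk len))
    (h_error : ∀ (others : List Obj) (frames : List (Nat × FrameLayout)),
      Calls Lay μ Vorbis.WayInv (Vorbis.conv u₀) Vorbis.L.error.entry (Vorbis.Spec.error.spec others frames))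
    (h_memset : ∀ (others : List Obj) (frames : List (Nat × FrameLayout)),
      Calls Lay μ Vorbis.WayInv (Vorbis.conv u₀) Vorbis.L.memset.entry (Vorbis.Spec.memset.spec others frames))
    (h_load4 : Asan.SmallCheck Lay μ Vorbis.WayInv (Vorbis.CodeOK u₀) [.rax, .rcx, .rdx] 4 Vorbis.L.__asan_load4_noabort.entry)
    (h_ilog : ∀ (others : List Obj) (frames : List (Nat × FrameLayout)),
      Calls Lay μ Vorbis.WayInv (Vorbis.conv u₀) Vorbis.L.ilog.entry (Vorbis.Spec.ilog.spec others frames)) :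
    SegC3b Lay μ u₀ := by
  intro g i v hat
  obtain ⟨A, A2, A3, Ai, hI, h1, h32, hle⟩ := hat
  have hce24 : (v.reg .rbp).toNat < 2 ^ 24 := by
    have := hI.k1.ent_lt
    omega
  -- 0x114536 → 0x11453f: the check of `c->entries`
  refine (c3b_head hLay hμ hcode h_load4 hI hle).trans ?_
  intro v1 h1'
  obtain ⟨hI1, ebp1, e12_1, hacc1, eent1⟩ := h1'
  have hle1 : ((v1.reg .rbp).toNat : Int) ≤ Codebook.entries v1.mem (g.cb v1.mem i) := by
    rw [ebp1, eent1]
    exact hle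
  rw [← ebp1] at hI1
  -- 0x11453f → 0x114590 (the loop's exit) ∨ 0x114550 (ilog returned)
  refine (c3b_test hLay hμ hcode h_ilog hI1 hle1 hacc1).trans ?_
  intro v2 h2
  rcases h2 with hx | ⟨hI2, ebp2, e12_2, _, hax2, eent2⟩
  · exact ReachVia.done (Or.inr (Or.inl ⟨A, A2, A3, Ai, hx⟩))
  have hle2 : ((v1.reg .rbp).toNat : Int) ≤ Codebook.entries v2.mem (g.cb v2.mem i) := by
    rw [eent2]
    exact hle1
  -- 0x114550 → 0x11455c: `n = get_bits(f, ilog(limit))`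
  refine (c3b_getn hLay hμ hcode h_get_bits hI2 hle2 hax2).trans ?_
  intro v3 h3
  obtain ⟨hI3, ebp3, e12_3, hn3, eent3⟩ := h3
  have hle3 : ((v1.reg .rbp).toNat : Int) ≤ Codebook.entries v3.mem (g.cb v3.mem i) := by
    rw [eent3]
    exact hle2
  have h12_3 : (v3.reg .r12).toNat = (v.reg .r12).toNat := by
    rw [e12_3, e12_2, e12_1]
  have h32_3 : (v3.reg .r12).toNat ≤ 32 := by
    rw [h12_3]
    exact h32
  -- 0x11455c → ERR ∨ 0x114573: `current_length ≥ 32` → error; the second check of `c->entries`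
  refine (c3b_len hLay hμ hcode h_error h_load4 hI3 hle3 h32_3).trans ?_
  intro v4 h4
  rcases h4 with herr | ⟨hI4, ebp4, e12_4, h31, er13, er15, hacc4, eent4⟩
  · exact ReachVia.done (Or.inr (Or.inr herr))
  have hle4 : ((v1.reg .rbp).toNat : Int) ≤ Codebook.entries v4.mem (g.cb v4.mem i) := by
    rw [eent4]
    exact hle3
  have ebp_all : v3.reg .rbp = v1.reg .rbp := by
    rw [ebp3, ebp2]
  have hce1 : (v1.reg .rbp).toNat < 2 ^ 24 := by
    rw [ebp1]
    exact hce24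
  have hrbp4 : v4.reg .rbp = UInt64.ofNat (v1.reg .rbp).toNat := by
    rw [ebp4, ebp_all]
    exact (addr_toNat _).symm
  have hr13_4 : v4.reg .r13 = UInt64.ofNat (v3.reg .rax).toNat := by
    rw [er13]
    exact c3b_r13_eq _ hn3
  have hr15_4 : v4.reg .r15 = UInt64.ofNat ((v1.reg .rbp).toNat + (v3.reg .rax).toNat) := by
    rw [er15, ebp_all]
    exact c3b_r15_eq _ _ hce1 hn3
  have h12_4 : (v4.reg .r12).toNat = (v.reg .r12).toNat := by
    rw [e12_4]
    exact h12_3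
  -- 0x114573 → ERR ∨ 0x11452f: `current_entry + n > entries` → error; memset
  refine (c3b_fill hLay hμ hcode h_error h_memset hI4 hle4 hrbp4 hr13_4 hr15_4 hn3 (by omega) (by omega) hacc4).trans ?_
  intro v5 h5
  rcases h5 with herr | ⟨hI5, e12_5, er15_5, hle5⟩
  · exact ReachVia.done (Or.inr (Or.inr herr))
  -- 0x11452f → 0x114536: `++current_length`, `current_entry += n`
  have h12_5 : (v5.reg .r12).toNat = (v.reg .r12).toNat := by
    rw [e12_5]
    exact h12_4
  refine (c3b_back hLay hμ hcode hI5 hle5 (er15_5.trans hr15_4) (by omega) (by omega)).mono ?_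
  intro w hw
  obtain ⟨hIw, e12w, hlew⟩ := hw
  refine Or.inl ⟨⟨A, A2, A3, Ai, hIw, by omega, by omega, hlew⟩, ?_⟩
  omega

end Vorbis.Spec.start_decoder_C3b

theorem Vorbis.Spec.Worked.start_decoder_C3b_ok : Vorbis.Spec.start_decoder_C3b.Statement := by
  intro Lay hLay μ hμ u₀ hcode h_get_bits h_error h_memset h_load4 h_ilog
  exact Vorbis.Spec.start_decoder_C3b.segC3b_walk hLay hμ hcode h_get_bits h_error h_memset h_load4 h_ilog
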